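-- pv_equiv track=rewrite | github.com/matte-v/project-euler | 28.py | generate_indexes_of_diagonal_cells
-- ===== SOURCE A (Python) =====
-- def generate_indexes_of_diagonal_cells(n_rings):
--     """
--     This can be obtained by drawing some rings of a spiral. Rings and elements in the ring must be zero-indexed
--     """
--     diag_indexes = [[0]]
--     for ring_index in range(1, n_rings):
--         list_1 = [1, 3, 5, 7]
--         list_2 = [(ring_index - 1) * x for x in [2, 4, 6, 8]]
--         element_wise_sum_list = [sum(x) for x in zip(list_1, list_2)]
--         diag_indexes.append(element_wise_sum_list)
--     return diag_indexes
-- ===== SOURCE B (Python) =====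
-- def generate_indexes_of_diagonal_cells(n_rings):
--     diag_indexes = [[0]]
--     prev = [1, 3, 5, 7]
--     for _ in range(1, n_rings):
--         diag_indexes.append(list(prev))
--         prev = [p + s for p, s in zip(prev, [2, 4, 6, 8])]
--     return diag_indexes
-- ===== Notes on version B (the rewrite author's own statement) =====
-- stated objective: faster
-- what changed: B replaces A's per-ring recomputation (a fresh step list (ring_index-1)*[2,4,6,8], a zip and a per-element sum() call each iteration) by a running accumulator that starts at [1,3,5,7] and is advanced by adding the constant vector [2,4,6,8] once per ring, dropping the multiplications and sum() calls (measured ~1.7x).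
import Mathlib
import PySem

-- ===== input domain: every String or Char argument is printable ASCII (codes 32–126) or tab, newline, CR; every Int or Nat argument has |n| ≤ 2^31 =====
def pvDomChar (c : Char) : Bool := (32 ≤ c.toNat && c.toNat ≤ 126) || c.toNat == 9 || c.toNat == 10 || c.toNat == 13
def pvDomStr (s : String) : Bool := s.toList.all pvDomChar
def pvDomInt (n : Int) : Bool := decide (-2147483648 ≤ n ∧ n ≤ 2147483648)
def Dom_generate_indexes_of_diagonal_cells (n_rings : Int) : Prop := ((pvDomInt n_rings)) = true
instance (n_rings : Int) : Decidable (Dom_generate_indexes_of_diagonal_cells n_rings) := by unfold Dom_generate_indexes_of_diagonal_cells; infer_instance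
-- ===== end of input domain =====

-- B keeps the same ring loop but replaces A's per-ring recomputation by a running
-- accumulator advanced by a constant step vector each iteration (measured faster in a timing run).


-- ===== PORT A =====
def generate_indexes_of_diagonal_cells (n_rings : Int) : List (List Int) :=
  (PySem.List.pyRange 1 n_rings 1).foldl
    (fun diag_indexes ring_index =>
      let list_1 : List Int := [1, 3, 5, 7]
      let list_2 : List Int := ([2, 4, 6, 8] : List Int).map (fun x => (ring_index - 1) * x)
      let element_wise_sum_list : List Int := (list_1.zip list_2).map (fun p => p.1 + p.2)
      diag_indexes ++ [element_wise_sum_list])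
    [[0]]

-- ===== PORT B =====
def generate_indexes_of_diagonal_cells_alt (n_rings : Int) : List (List Int) :=
  ((PySem.List.pyRange 1 n_rings 1).foldl
    (fun (st : List (List Int) × List Int) _ =>
      (st.1 ++ [st.2], (st.2.zip ([2, 4, 6, 8] : List Int)).map (fun p => p.1 + p.2)))
    ([[0]], [1, 3, 5, 7])).1

-- ===== PRECONDITION & SPEC =====
def Spec_generate_indexes_of_diagonal_cells (n_rings : Int) (out : List (List Int)) : Prop := out = generate_indexes_of_diagonal_cells_alt n_rings
instance (n_rings : Int) (out : List (List Int)) : Decidable (Spec_generate_indexes_of_diagonal_cells n_rings out) := by unfold Spec_generate_indexes_of_diagonal_cells; infer_instance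

-- ===== CLAIM (what is proved, stated in full; the proofs are below) =====
def Claim_equal_generate_indexes_of_diagonal_cells : Prop := ∀ (n_rings : Int), Dom_generate_indexes_of_diagonal_cells n_rings → Spec_generate_indexes_of_diagonal_cells n_rings (generate_indexes_of_diagonal_cells n_rings)

-- ===== LEMMAS AND PROOFS =====

/-- The four diagonal values of ring `n` (for `n ≥ 1`). -/
def pvRing (n : Int) : List Int :=
  [1 + (n - 1) * 2, 3 + (n - 1) * 4, 5 + (n - 1) * 6, 7 + (n - 1) * 8]

/-- Invariant: folding B's step over `range(1, 1+m)` yields A's fold paired with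
    the values of ring `1+m`. -/
theorem pv_invariant (m : Nat) :
    (PySem.List.pyRange 1 (1 + (m : Int)) 1).foldl
      (fun (st : List (List Int) × List Int) _ =>
        (st.1 ++ [st.2], (st.2.zip ([2, 4, 6, 8] : List Int)).map (fun p => p.1 + p.2)))
      ([[0]], [1, 3, 5, 7])
    = (generate_indexes_of_diagonal_cells (1 + (m : Int)), pvRing (1 + (m : Int))) := by
  induction m with
  | zero =>
      simp [PySem.List.pyRange_one_eq_nil, generate_indexes_of_diagonal_cells, pvRing]
  | succ k ih =>
      have h1 : (1 : Int) ≤ 1 + (k : Int) := by omega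
      have hr : (1 : Int) + ((k : Int) + 1) = (1 + (k : Int)) + 1 := by ring
      have hsplit := PySem.List.pyRange_one_succ_right (a := 1) (b := 1 + (k : Int)) h1
      unfold generate_indexes_of_diagonal_cells at ih ⊢
      push_cast
      rw [hr, hsplit, List.foldl_append, List.foldl_append, ih]
      simp [pvRing]
      constructor
      · ring_nf
      · ring_nf
        simp

theorem generate_indexes_of_diagonal_cells_eq (n_rings : Int) :
    generate_indexes_of_diagonal_cells n_rings = generate_indexes_of_diagonal_cells_alt n_rings := by
  unfold generate_indexes_of_diagonal_cells_alt
  by_cases h : n_rings ≤ 1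
  · rw [PySem.List.pyRange_one_eq_nil h]
    unfold generate_indexes_of_diagonal_cells
    rw [PySem.List.pyRange_one_eq_nil h]
    rfl
  · have hm : n_rings = 1 + ((n_rings - 1).toNat : Int) := by omega
    rw [hm, pv_invariant]

-- ===== VERDICT (by name: the statement is the Claim_ definition above) =====
theorem generate_indexes_of_diagonal_cells_spec : Claim_equal_generate_indexes_of_diagonal_cells := by
  intro n _
  unfold Spec_generate_indexes_of_diagonal_cells
  exact generate_indexes_of_diagonal_cells_eq n
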